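-- pv_equiv track=rewrite | github.com/shiranthaDS/NexusHR-AI | backend/app/rag_system.py | _create_summary_answer
-- ===== SOURCE A (Python) =====
-- from typing import List, Dict, Any
--
-- def _create_summary_answer(question: str, lines: List[str]) -> str:
--     """Create a concise, focused summary answer from context lines"""
--     # Filter to non-empty lines with meaningful content
--     content_lines = [line.strip() for line in lines if line.strip() and not line.strip().startswith('---') and len(line.strip()) > 10]
--
--     # Extract meaningful keywords (excluding common words)
--     common_words = {'what', 'how', 'when', 'where', 'who', 'is', 'are', 'the', 'a', 'an', 'do', 'does', 'can', 'i', 'my', 'about', 'for', 'with', 'that', 'this', 'be', 'to', 'of', 'in', 'on', 'at', 'tell', 'me', 'company'}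
--     question_keywords = [w.strip('?.,!').lower() for w in question.split() if w.lower() not in common_words and len(w) > 2]
--
--     # If question is too general, provide a concise overview
--     if len(question_keywords) <= 1 or any(word in question.lower() for word in ['tell me about', 'what is', 'explain', 'overview']):
--         # For general questions, give a brief summary
--         intro_lines = []
--         for line in content_lines[:20]:  # Check first 20 lines
--             # Skip section headers and list items
--             if line.endswith(':') or line.startswith('•') or line.startswith('-'):
--                 continue
--             if len(line) > 30:  # Only substantial lines
--                 intro_lines.append(line)
--                 if len(intro_lines) >= 3:  # Max 3 lines for overview
--                     break
--
--         if intro_lines: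
--             return "Based on the company policies:\n\n" + '\n\n'.join(intro_lines)
--
--     # For specific questions, find most relevant lines
--     relevant_lines = []
--     for line in content_lines:
--         line_lower = line.lower()
--         # Count keyword matches
--         matches = sum(1 for kw in question_keywords if kw in line_lower)
--         if matches > 0:
--             relevant_lines.append((matches, line))
--
--     # Sort by relevance and take top 4 lines (more concise)
--     relevant_lines.sort(reverse=True, key=lambda x: x[0])
--     best_lines = [line for _, line in relevant_lines[:4]]
--
--     if best_lines:
--         return "Based on the company policies:\n\n" + '\n'.join(best_lines)
--
--     # Absolute fallback
--     return "I apologize, but I couldn't find specific information to answer your question in the uploaded documents. Please try rephrasing or contact HR directly."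
-- ===== SOURCE B (Python) =====
-- from typing import List
--
-- def _create_summary_answer(question: str, lines: List[str]) -> str:
--     """Create a concise, focused summary answer from context lines"""
--     # Single explicit pass to collect the usable content lines.
--     content_lines = []
--     for line in lines:
--         s = line.strip()
--         if s and not s.startswith('---') and len(s) > 10:
--             content_lines.append(s)
--
--     common_words = {'what', 'how', 'when', 'where', 'who', 'is', 'are', 'the', 'a', 'an', 'do', 'does', 'can', 'i', 'my', 'about', 'for', 'with', 'that', 'this', 'be', 'to', 'of', 'in', 'on', 'at', 'tell', 'me', 'company'}
--     question_keywords = []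
--     for w in question.split():
--         if w.lower() not in common_words and len(w) > 2:
--             question_keywords.append(w.strip('?.,!').lower())
--
--     ql = question.lower()
--     if len(question_keywords) <= 1 or 'tell me about' in ql or 'what is' in ql or 'explain' in ql or 'overview' in ql:
--         # filter-then-truncate replaces the counting loop with an early break
--         intro_lines = [l for l in content_lines[:20]
--                        if len(l) > 30
--                        and not (l.endswith(':') or l.startswith('•') or l.startswith('-'))][:3]
--         if intro_lines:
--             return "Based on the company policies:\n\n" + '\n\n'.join(intro_lines)
--
--     # Specific path: bucket lines by match count instead of sorting pairs.
--     # Each bucket keeps encounter order; counts are walked strictly descending,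
--     # which reproduces the stable reverse sort by count without sorting.
--     buckets = {}
--     for line in content_lines:
--         ll = line.lower()
--         m = len([kw for kw in question_keywords if kw in ll])
--         if m > 0:
--             buckets.setdefault(m, []).append(line)
--
--     best_lines = []
--     c = len(question_keywords)
--     while c > 0:
--         best_lines += buckets.get(c, [])
--         c -= 1
--     best_lines = best_lines[:4]
--
--     if best_lines:
--         return "Based on the company policies:\n\n" + '\n'.join(best_lines)
--
--     return "I apologize, but I couldn't find specific information to answer your question in the uploaded documents. Please try rephrasing or contact HR directly."
-- ===== Notes on version B (the rewrite author's own statement) =====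
-- stated objective: faster
-- what changed: B is a single-pass loop decomposition throughout: explicit accumulator loops build content lines and keywords, the general-question break loop becomes filter-then-truncate, and the specific path replaces the (count, line) pair list plus stable reverse sort with a dict of match-count buckets concatenated by a countdown over counts.
import Mathlib
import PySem

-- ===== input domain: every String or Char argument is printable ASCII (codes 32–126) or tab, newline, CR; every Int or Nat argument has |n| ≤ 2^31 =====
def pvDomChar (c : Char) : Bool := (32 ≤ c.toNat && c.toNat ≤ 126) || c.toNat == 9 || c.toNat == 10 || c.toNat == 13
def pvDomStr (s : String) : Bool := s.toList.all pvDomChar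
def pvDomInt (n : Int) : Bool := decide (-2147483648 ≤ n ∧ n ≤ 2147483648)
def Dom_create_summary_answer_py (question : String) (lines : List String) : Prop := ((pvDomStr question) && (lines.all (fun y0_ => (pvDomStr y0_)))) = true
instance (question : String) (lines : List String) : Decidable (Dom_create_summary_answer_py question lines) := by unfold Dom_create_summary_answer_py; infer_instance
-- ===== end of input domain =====

-- B is a single-pass loop decomposition: accumulator loops for content lines and
-- keywords, filter-then-truncate for the general path, and count buckets walked
-- by a countdown instead of a stable reverse sort (objective: alternative).

-- shared string constants (identical literals in both Python versions)
def pvCommonWords : List String :=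
  ["what", "how", "when", "where", "who", "is", "are", "the", "a", "an", "do", "does", "can",
   "i", "my", "about", "for", "with", "that", "this", "be", "to", "of", "in", "on", "at",
   "tell", "me", "company"]
def pvHeader : String := "Based on the company policies:\n\n"
def pvApology : String := "I apologize, but I couldn't find specific information to answer your question in the uploaded documents. Please try rephrasing or contact HR directly."

-- ===== PORT A =====
def pvContent (lines : List String) : List String :=
  (lines.map PySem.Str.strip).filter
    (fun l => !(l == "") && !(PySem.Str.startswith l "---") && decide (10 < PySem.Str.len l))

def pvKeywords (question : String) : List String :=
  ((PySem.Str.split₀ question).filter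
      (fun w => !(pvCommonWords.contains (PySem.Str.lower w)) && decide (2 < PySem.Str.len w))).map
    (fun w => PySem.Str.lower (PySem.Str.stripChars w "?.,!"))

def pvGeneral (question : String) (kws : List String) : Bool :=
  decide (kws.length ≤ 1) ||
    (["tell me about", "what is", "explain", "overview"].any
      (fun w => PySem.Str.isIn w (PySem.Str.lower question)))

-- the general-question loop with its early break at 3 collected lines
def pvIntroLoop (acc : List String) : List String → List String
  | [] => acc
  | l :: ls =>
    if PySem.Str.endswith l ":" || PySem.Str.startswith l "•" || PySem.Str.startswith l "-" then
      pvIntroLoop acc ls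
    else if 30 < PySem.Str.len l then
      if 3 ≤ (acc ++ [l]).length then acc ++ [l] else pvIntroLoop (acc ++ [l]) ls
    else pvIntroLoop acc ls

-- sum(1 for kw in kws if kw in line.lower())
def pvMatches (kws : List String) (line : String) : Nat :=
  kws.countP (fun kw => PySem.Str.isIn kw (PySem.Str.lower line))

-- A's pair-building loop body
def pvStepA (kws : List String) (acc : List (Nat × String)) (line : String) : List (Nat × String) :=
  let m := pvMatches kws line
  if 0 < m then acc ++ [(m, line)] else acc

-- A's specific-question path: pair list + stable reverse sort by match count
def pvSpecificA (cls kws : List String) : String :=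
  let relevant_lines : List (Nat × String) := cls.foldl (pvStepA kws) []
  let best_lines :=
    ((PySem.List.sorted relevant_lines (fun p => p.1) true).take 4).map (fun p => p.2)
  if best_lines ≠ [] then pvHeader ++ PySem.Str.join "\n" best_lines else pvApology

def create_summary_answer_py (question : String) (lines : List String) : String :=
  let content_lines := pvContent lines
  let question_keywords := pvKeywords question
  if pvGeneral question question_keywords then
    let intro_lines := pvIntroLoop [] (content_lines.take 20)
    if intro_lines ≠ [] then pvHeader ++ PySem.Str.join "\n\n" intro_lines
    else pvSpecificA content_lines question_keywords
  else pvSpecificA content_lines question_keywords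

-- ===== PORT B =====
-- B's explicit content-collecting loop body
def pvContentStep (acc : List String) (line : String) : List String :=
  let s := PySem.Str.strip line
  if !(s == "") && !(PySem.Str.startswith s "---") && decide (10 < PySem.Str.len s) then
    acc ++ [s]
  else acc

-- B's explicit keyword-collecting loop body
def pvKwStep (acc : List String) (w : String) : List String :=
  if !(pvCommonWords.contains (PySem.Str.lower w)) && decide (2 < PySem.Str.len w) then
    acc ++ [PySem.Str.lower (PySem.Str.stripChars w "?.,!")]
  else acc

-- B's generality test as an explicit or-chain over ql
def pvGeneralB (question : String) (kws : List String) : Bool :=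
  let ql := PySem.Str.lower question
  decide (kws.length ≤ 1) || PySem.Str.isIn "tell me about" ql || PySem.Str.isIn "what is" ql ||
    PySem.Str.isIn "explain" ql || PySem.Str.isIn "overview" ql

-- B's intro selection: filter-then-truncate, no counting loop
def pvIntroB (cls : List String) : List String :=
  ((cls.take 20).filter (fun l =>
      decide (30 < PySem.Str.len l) &&
        !(PySem.Str.endswith l ":" || PySem.Str.startswith l "•" ||
          PySem.Str.startswith l "-"))).take 3

-- len([kw for kw in kws if kw in ll])
def pvMatchesB (kws : List String) (ll : String) : Nat :=
  (kws.filter (fun kw => PySem.Str.isIn kw ll)).length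

-- B's bucket-building loop body (setdefault(m, []).append(line))
def pvStepB (kws : List String) (d : PySem.Dict Nat (List String)) (line : String) : PySem.Dict Nat (List String) :=
  let ll := PySem.Str.lower line
  let m := pvMatchesB kws ll
  if 0 < m then d.insert m (d.getD m [] ++ [line]) else d

-- the countdown 'while c > 0: best += buckets.get(c, []); c -= 1'
def pvCollect (d : PySem.Dict Nat (List String)) : Nat → List String
  | 0 => []
  | c + 1 => d.getD (c + 1) [] ++ pvCollect d c

-- B's specific-question path: dict of count buckets, counts counted down
def pvSpecificB (cls kws : List String) : String :=
  let buckets : PySem.Dict Nat (List String) := cls.foldl (pvStepB kws) PySem.Dict.empty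
  let best_lines := (pvCollect buckets kws.length).take 4
  if best_lines ≠ [] then pvHeader ++ PySem.Str.join "\n" best_lines else pvApology

def create_summary_answer_py_alt (question : String) (lines : List String) : String :=
  let content_lines := lines.foldl pvContentStep []
  let question_keywords := (PySem.Str.split₀ question).foldl pvKwStep []
  if pvGeneralB question question_keywords then
    let intro_lines := pvIntroB content_lines
    if intro_lines ≠ [] then pvHeader ++ PySem.Str.join "\n\n" intro_lines
    else pvSpecificB content_lines question_keywords
  else pvSpecificB content_lines question_keywords

-- ===== PRECONDITION & SPEC =====
def Spec_create_summary_answer_py (question : String) (lines : List String) (out : String) : Prop := out = create_summary_answer_py_alt question lines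
instance (question : String) (lines : List String) (out : String) : Decidable (Spec_create_summary_answer_py question lines out) := by unfold Spec_create_summary_answer_py; infer_instance

-- ===== CLAIM (what is proved, stated in full; the proofs are below) =====
def Claim_equal_create_summary_answer_py : Prop := ∀ (question : String) (lines : List String), Dom_create_summary_answer_py question lines → Spec_create_summary_answer_py question lines (create_summary_answer_py question lines)

-- ===== LEMMAS AND PROOFS =====

-- B's accumulator loops compute A's comprehensions
theorem pv_content_eq (lines : List String) : lines.foldl pvContentStep [] = pvContent lines := by
  have h : lines.foldl pvContentStep []
      = [] ++ (lines.filter (fun x =>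
          (fun l => !(l == "") && !(PySem.Str.startswith l "---") && decide (10 < PySem.Str.len l))
            (PySem.Str.strip x))).map PySem.Str.strip :=
    PySem.List.foldl_append_if _ PySem.Str.strip lines []
  rw [h, List.nil_append, pvContent, List.filter_map]
  rfl

theorem pv_keywords_eq (question : String) :
    (PySem.Str.split₀ question).foldl pvKwStep [] = pvKeywords question := by
  have h : (PySem.Str.split₀ question).foldl pvKwStep []
      = [] ++ (((PySem.Str.split₀ question).filter
          (fun w => !(pvCommonWords.contains (PySem.Str.lower w)) && decide (2 < PySem.Str.len w))).map
            (fun w => PySem.Str.lower (PySem.Str.stripChars w "?.,!"))) :=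
    PySem.List.foldl_append_if _ _ _ []
  rw [h, List.nil_append, pvKeywords]

theorem pv_general_eq (question : String) (kws : List String) :
    pvGeneral question kws = pvGeneralB question kws := by
  simp [pvGeneral, pvGeneralB, List.any_cons, List.any_nil, Bool.or_assoc]

-- the early-break loop is filter-then-truncate
theorem pv_introLoop_eq_filter (xs acc : List String) (h : acc.length < 3) :
    pvIntroLoop acc xs
      = acc ++ ((xs.filter (fun l =>
          decide (30 < PySem.Str.len l) &&
            !(PySem.Str.endswith l ":" || PySem.Str.startswith l "•" ||
              PySem.Str.startswith l "-"))).take (3 - acc.length)) := by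
  induction xs generalizing acc with
  | nil => simp [pvIntroLoop]
  | cons l ls ih =>
    by_cases hh : (PySem.Str.endswith l ":" || PySem.Str.startswith l "•" ||
        PySem.Str.startswith l "-") = true
    · rw [pvIntroLoop, if_pos hh, ih acc h]
      simp only [List.filter_cons, hh, Bool.not_true, Bool.and_false, Bool.false_eq_true,
        if_false]
    · have hh2 : (PySem.Str.endswith l ":" || PySem.Str.startswith l "•" ||
          PySem.Str.startswith l "-") = false := Bool.eq_false_iff.mpr hh
      rw [pvIntroLoop, if_neg hh]
      by_cases hl : 30 < PySem.Str.len l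
      · rw [if_pos hl]
        have hf : (l :: ls).filter (fun l =>
            decide (30 < PySem.Str.len l) &&
              !(PySem.Str.endswith l ":" || PySem.Str.startswith l "•" ||
                PySem.Str.startswith l "-"))
            = l :: ls.filter (fun l =>
            decide (30 < PySem.Str.len l) &&
              !(PySem.Str.endswith l ":" || PySem.Str.startswith l "•" ||
                PySem.Str.startswith l "-")) := by
          simp only [List.filter_cons, hh2, Bool.not_false, Bool.and_true, hl, decide_true,
            if_true]
        rw [hf]
        by_cases h3 : 3 ≤ (acc ++ [l]).length
        · rw [if_pos h3]
          have : acc.length = 2 := by simp at h3; omega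
          rw [this]
          simp [List.take]
        · rw [if_neg h3, ih (acc ++ [l]) (by simp at h3 ⊢; omega)]
          have : 3 - acc.length = (3 - (acc ++ [l]).length) + 1 := by
            simp at h3 ⊢; omega
          rw [this]
          simp [List.take_succ_cons]
      · rw [if_neg hl, ih acc h]
        simp only [List.filter_cons, hl, decide_false, Bool.false_and, Bool.false_eq_true,
          if_false]

theorem pv_matches_eq (kws : List String) (line : String) :
    pvMatchesB kws (PySem.Str.lower line) = pvMatches kws line := by
  rw [pvMatchesB, pvMatches, List.countP_eq_length_filter]

-- buckets of xs for key values c, c-1, …, 0, each bucket in encounter order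
def pvBuckets {α : Type} (key : α → Nat) : Nat → List α → List α
  | 0, xs => xs.filter (fun x => key x == 0)
  | c + 1, xs => xs.filter (fun x => key x == c + 1) ++ pvBuckets key c xs

theorem pv_insertBy_append_front {α : Type} (before : α → α → Bool) (x : α)
    (as bs : List α) (h : ∀ y ∈ as, before x y = false) :
    PySem.List.insertBy before x (as ++ bs) = as ++ PySem.List.insertBy before x bs := by
  induction as with
  | nil => simp
  | cons a as ih =>
    have ha : before x a = false := h a (by simp)
    simp only [List.cons_append, PySem.List.insertBy, ha]
    simp only [Bool.false_eq_true, if_false]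
    rw [ih (fun y hy => h y (by simp [hy]))]

theorem pv_insertBy_all_before {α : Type} (before : α → α → Bool) (x : α)
    (bs : List α) (h : ∀ y ∈ bs, before x y = true) :
    PySem.List.insertBy before x bs = x :: bs := by
  cases bs with
  | nil => simp [PySem.List.insertBy]
  | cons b bs => simp [PySem.List.insertBy, h b (by simp)]

theorem pv_mem_buckets_le {α : Type} (key : α → Nat) (c : Nat) (xs : List α)
    (y : α) (hy : y ∈ pvBuckets key c xs) : key y ≤ c := by
  induction c with
  | zero =>
    simp only [pvBuckets, List.mem_filter, beq_iff_eq] at hy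
    omega
  | succ c ih =>
    simp only [pvBuckets, List.mem_append, List.mem_filter, beq_iff_eq] at hy
    rcases hy with ⟨_, h⟩ | h
    · omega
    · exact Nat.le_succ_of_le (ih h)

theorem pv_buckets_append_gt {α : Type} (key : α → Nat) (c : Nat) (xs : List α)
    (x : α) (hx : c < key x) : pvBuckets key c (xs ++ [x]) = pvBuckets key c xs := by
  induction c with
  | zero =>
    simp only [pvBuckets, List.filter_append, List.filter_cons, List.filter_nil, beq_iff_eq]
    have : ¬ key x = 0 := by omega
    simp [this]
  | succ c ih =>
    simp only [pvBuckets, List.filter_append, List.filter_cons, List.filter_nil, beq_iff_eq]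
    have h1 : ¬ key x = c + 1 := by omega
    rw [ih (by omega)]
    simp [h1]

theorem pv_buckets_nil {α : Type} (key : α → Nat) (c : Nat) : pvBuckets key c [] = [] := by
  induction c with
  | zero => simp [pvBuckets]
  | succ c ih => simp [pvBuckets, ih]

theorem pv_insertBy_buckets {α : Type} (key : α → Nat) (c : Nat) (xs : List α)
    (x : α) (hx : key x ≤ c) :
    PySem.List.insertBy (fun a b => decide (key b < key a)) x (pvBuckets key c xs)
      = pvBuckets key c (xs ++ [x]) := by
  induction c with
  | zero =>
    have hx0 : key x = 0 := by omega
    rw [PySem.List.insertBy_of_forall_not_before]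
    · simp only [pvBuckets, List.filter_append, List.filter_cons, List.filter_nil, beq_iff_eq,
        hx0]
      simp
    · intro y hy
      simp only [pvBuckets, List.mem_filter, beq_iff_eq] at hy
      simp [hy.2, hx0]
  | succ c ih =>
    have hfront : ∀ y ∈ xs.filter (fun z => key z == c + 1),
        (fun a b => decide (key b < key a)) x y = false := by
      intro y hy
      simp only [List.mem_filter, beq_iff_eq] at hy
      simp only [decide_eq_false_iff_not, not_lt]
      omega
    simp only [pvBuckets]
    rw [pv_insertBy_append_front _ _ _ _ hfront]
    by_cases hc : key x = c + 1
    · rw [pv_insertBy_all_before]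
      · rw [pv_buckets_append_gt key c xs x (by omega)]
        simp only [List.filter_append, List.filter_cons, List.filter_nil, beq_iff_eq, hc]
        simp
      · intro y hy
        have := pv_mem_buckets_le key c xs y hy
        simp only [decide_eq_true_eq]
        omega
    · have hxc : key x ≤ c := by omega
      rw [ih hxc]
      have h1 : ¬ key x = c + 1 := hc
      simp only [List.filter_append, List.filter_cons, List.filter_nil, beq_iff_eq]
      simp [h1]

theorem pv_sorted_eq_buckets {α : Type} (key : α → Nat) (K : Nat) (xs : List α)
    (h : ∀ y ∈ xs, key y ≤ K) :
    PySem.List.sorted xs key true = pvBuckets key K xs := by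
  rw [PySem.List.sorted_rev_eq_foldl_insertBy]
  induction xs using List.reverseRecOn with
  | nil => simp [pv_buckets_nil]
  | append_singleton xs x ih =>
    rw [List.foldl_append]
    simp only [List.foldl_cons, List.foldl_nil]
    rw [ih (fun y hy => h y (by simp [hy]))]
    exact pv_insertBy_buckets key K xs x (h x (by simp))

theorem pv_rl_bounds (kws cls : List String) (acc : List (Nat × String))
    (hacc : ∀ p ∈ acc, 1 ≤ p.1 ∧ p.1 ≤ kws.length) :
    ∀ p ∈ cls.foldl (pvStepA kws) acc, 1 ≤ p.1 ∧ p.1 ≤ kws.length := by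
  induction cls generalizing acc with
  | nil => simpa using hacc
  | cons l ls ih =>
    intro p hp
    simp only [List.foldl_cons] at hp
    refine ih (pvStepA kws acc l) ?_ p hp
    intro q hq
    unfold pvStepA at hq
    by_cases hm : 0 < pvMatches kws l
    · rw [if_pos hm] at hq
      rcases List.mem_append.mp hq with hq | hq
      · exact hacc q hq
      · rcases List.mem_singleton.mp hq with rfl
        exact ⟨hm, List.countP_le_length⟩
    · rw [if_neg hm] at hq
      exact hacc q hq

theorem pv_dict_invariant (kws cls : List String) (acc : List (Nat × String))
    (d0 : PySem.Dict Nat (List String))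
    (h : ∀ c, d0.getD c [] = (acc.filter (fun p => p.1 == c)).map Prod.snd) :
    ∀ c, (cls.foldl (pvStepB kws) d0).getD c []
      = ((cls.foldl (pvStepA kws) acc).filter (fun p => p.1 == c)).map Prod.snd := by
  induction cls generalizing acc d0 with
  | nil => simpa using h
  | cons l ls ih =>
    intro c
    simp only [List.foldl_cons]
    refine ih (pvStepA kws acc l) (pvStepB kws d0 l) ?_ c
    intro c'
    simp only [pvStepA, pvStepB, pv_matches_eq]
    by_cases hm : 0 < pvMatches kws l
    · rw [if_pos hm, if_pos hm, PySem.Dict.getD_insert]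
      by_cases hc : c' = pvMatches kws l
      · rw [if_pos hc, h (pvMatches kws l), hc]
        simp [List.filter_append]
      · have hne : ¬ pvMatches kws l = c' := fun hh => hc hh.symm
        rw [if_neg hc, h c']
        simp [List.filter_append, hne]
    · rw [if_neg hm, if_neg hm, h c']

-- the countdown collection reads out the descending count buckets
theorem pv_collect_eq_buckets (d : PySem.Dict Nat (List String)) (rl : List (Nat × String))
    (K : Nat) (hpos : ∀ p ∈ rl, 1 ≤ p.1)
    (hinv : ∀ c, d.getD c [] = (rl.filter (fun p => p.1 == c)).map Prod.snd) :
    pvCollect d K = (pvBuckets (fun p => p.1) K rl).map Prod.snd := by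
  induction K with
  | zero =>
    have : rl.filter (fun p => p.1 == 0) = [] := by
      rw [List.filter_eq_nil_iff]
      intro p hp
      have := hpos p hp
      simp only [beq_iff_eq]
      omega
    simp [pvCollect, pvBuckets, this]
  | succ K ih =>
    simp only [pvCollect, pvBuckets, List.map_append]
    rw [ih, hinv (K + 1)]

-- the two specific-question paths agree
theorem pv_specific_eq (cls kws : List String) : pvSpecificA cls kws = pvSpecificB cls kws := by
  have hbnd := pv_rl_bounds kws cls [] (by simp)
  have hinv := pv_dict_invariant kws cls [] PySem.Dict.empty (by intro c; simp)
  have hbest :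
      ((PySem.List.sorted (cls.foldl (pvStepA kws) []) (fun p => p.1) true).take 4).map Prod.snd
        = (pvCollect (cls.foldl (pvStepB kws) PySem.Dict.empty) kws.length).take 4 := by
    rw [pv_sorted_eq_buckets (fun p => p.1) kws.length _ (fun y hy => (hbnd y hy).2),
      pv_collect_eq_buckets _ _ kws.length (fun p hp => (hbnd p hp).1) hinv, List.map_take]
  simp only [pvSpecificA, pvSpecificB]
  rw [hbest]

-- ===== VERDICT (by name: the statement is the Claim_ definition above) =====
theorem create_summary_answer_py_spec : Claim_equal_create_summary_answer_py := by
  intro question lines _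
  unfold Spec_create_summary_answer_py
  simp only [create_summary_answer_py, create_summary_answer_py_alt,
    pv_content_eq, pv_keywords_eq, pv_general_eq, pv_specific_eq]
  rw [pv_introLoop_eq_filter _ [] (by simp)]
  simp only [List.nil_append, pvIntroB, List.length_nil, Nat.sub_zero]
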